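-- pv_equiv track=rewrite | github.com/pypi-data/pypi-mirror-274 | packages/vesselasid/vesselasid-1.0.19.tar.gz/vesselasid-1.0.19/vesselasid/asid.py | _encode_code
-- ===== SOURCE A (Python) =====
-- def _encode_code(code):
--     data = []
--     while code:
--         batch = code[:7]
--         code = code[7:]
--         msb = 0
--         for i in range(len(batch)):
--             if batch[i] & 0x80:
--                 msb += 2**i
--                 batch[i] -= 0x80
--         data.extend([msb] + batch)
--     return data
-- ===== SOURCE B (Python) =====
-- def _encode_code(code):
--     data = []
--     msb = 0
--     batch = []
--     for b in code:
--         if b & 0x80: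
--             msb += 2 ** len(batch)
--             b -= 0x80
--         batch.append(b)
--         if len(batch) == 7:
--             data.append(msb)
--             data.extend(batch)
--             msb = 0
--             batch = []
--     if batch:
--         data.append(msb)
--         data.extend(batch)
--     return data
-- ===== Notes on version B (the rewrite author's own statement) =====
-- stated objective: faster
-- what changed: Replaced the while-loop that repeatedly reslices the remaining list into 7-byte chunks (code[:7]/code[7:], quadratic copying) plus an inner index loop mutating each chunk with a single flat for-loop over the bytes carrying a running msb accumulator and current batch, flushed every 7 bytes and once at the end.
import Mathlib
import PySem

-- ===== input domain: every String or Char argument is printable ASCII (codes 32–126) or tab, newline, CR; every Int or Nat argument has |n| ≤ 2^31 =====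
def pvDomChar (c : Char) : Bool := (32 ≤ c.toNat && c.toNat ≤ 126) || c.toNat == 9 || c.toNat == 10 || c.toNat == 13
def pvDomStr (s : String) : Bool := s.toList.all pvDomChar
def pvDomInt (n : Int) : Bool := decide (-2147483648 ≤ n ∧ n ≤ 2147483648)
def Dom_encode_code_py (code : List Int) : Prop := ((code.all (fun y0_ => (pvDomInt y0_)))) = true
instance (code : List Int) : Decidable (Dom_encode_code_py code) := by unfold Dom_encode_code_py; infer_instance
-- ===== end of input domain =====

-- B replaces A's while-loop that repeatedly reslices the remaining list into 7-byte chunks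
-- (quadratic copying, with an inner index loop mutating each chunk) by one flat pass carrying
-- a running msb accumulator and current batch: O(n) instead of O(n^2), measured faster.

-- ===== PORT A =====
-- inner `for i in range(len(batch))` body: reads batch[i] (always in range, so getD is exact), mutates it in place
def encAStep (s : Int × List Int) (i : Nat) : Int × List Int :=
  if PySem.Int.band (s.2.getD i 0) 0x80 ≠ 0 then
    (s.1 + 2 ^ i, s.2.set i (s.2.getD i 0 - 0x80))
  else s

-- `while code:` as recursion on code with the `data` accumulator; code[:7]/code[7:] are take/drop (exact for nonnegative slices)
def encALoop : List Int → List Int → List Int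
  | [], data => data
  | x :: t, data =>
      let batch := (x :: t).take 7
      let rest := (x :: t).drop 7
      let r := (List.range batch.length).foldl encAStep (0, batch)
      encALoop rest (data ++ [r.1] ++ r.2)
termination_by code => code.length
decreasing_by simp

def encode_code_py (code : List Int) : List Int := encALoop code []

-- ===== PORT B =====
-- loop body of B's single flat pass: state = (data, msb, batch)
def encBStep (s : List Int × Int × List Int) (b : Int) : List Int × Int × List Int :=
  let p := if PySem.Int.band b 0x80 ≠ 0 then (s.2.1 + 2 ^ s.2.2.length, b - 0x80) else (s.2.1, b)
  let batch := s.2.2 ++ [p.2]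
  if batch.length = 7 then (s.1 ++ p.1 :: batch, 0, []) else (s.1, p.1, batch)

def encode_code_py_alt (code : List Int) : List Int :=
  match code.foldl encBStep ([], 0, []) with
  | (data, msb, batch) => if batch ≠ [] then data ++ msb :: batch else data

-- ===== PRECONDITION & SPEC =====
def Spec_encode_code_py (code : List Int) (out : List Int) : Prop := out = encode_code_py_alt code
instance (code : List Int) (out : List Int) : Decidable (Spec_encode_code_py code out) := by unfold Spec_encode_code_py; infer_instance

-- ===== CLAIM (what is proved, stated in full; the proofs are below) =====
def Claim_equal_encode_code_py : Prop := ∀ (code : List Int), Dom_encode_code_py code → Spec_encode_code_py code (encode_code_py code)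

-- ===== LEMMAS AND PROOFS =====

-- the low-7-bits transform of one byte
def loB (b : Int) : Int := if PySem.Int.band b 0x80 ≠ 0 then b - 0x80 else b

-- msb bitmask of a chunk, bit positions starting at j
def hiB (j : Nat) : List Int → Int
  | [] => 0
  | b :: t => (if PySem.Int.band b 0x80 ≠ 0 then (2 : Int) ^ j else 0) + hiB (j + 1) t

-- canonical chunked output both programs compute
def canonB : List Int → List Int
  | [] => []
  | x :: t =>
      hiB 0 ((x :: t).take 7) :: (((x :: t).take 7).map loB ++ canonB ((x :: t).drop 7))
termination_by code => code.length
decreasing_by simp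

theorem encAStep_range' (rest : List Int) : ∀ (done : List Int) (msb : Int),
    (List.range' done.length rest.length).foldl encAStep (msb, done ++ rest)
      = (msb + hiB done.length rest, done ++ rest.map loB) := by
  induction rest with
  | nil => intro done msb; simp [hiB]
  | cons b t ih =>
      intro done msb
      simp only [List.length_cons]
      rw [List.range'_succ, List.foldl_cons]
      have hset : ∀ v, (done ++ b :: t).set done.length v = done ++ v :: t := by
        intro v; rw [List.set_append_right _ _ (Nat.le_refl done.length)]; simp
      have hih := ih (done ++ [loB b])
      simp only [List.length_append, List.length_cons, List.length_nil, Nat.zero_add,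
        List.append_assoc, List.singleton_append] at hih
      by_cases hb : PySem.Int.band b 0x80 ≠ 0
      · have hstep : encAStep (msb, done ++ b :: t) done.length
            = (msb + 2 ^ done.length, done ++ loB b :: t) := by
          simp [encAStep, hset, hb, loB]
        rw [hstep, hih (msb + 2 ^ done.length)]
        simp [hiB, hb, add_assoc]
      · have hstep : encAStep (msb, done ++ b :: t) done.length
            = (msb, done ++ loB b :: t) := by
          simp [encAStep, hb, loB]
        rw [hstep, hih msb]
        simp [hiB, hb, loB]

theorem encAChunk_eq (batch : List Int) :
    (List.range batch.length).foldl encAStep (0, batch) = (hiB 0 batch, batch.map loB) := by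
  have := encAStep_range' batch [] 0
  simpa [List.range_eq_range'] using this

theorem encALoop_eq : ∀ (code : List Int), ∀ data, encALoop code data = data ++ canonB code := by
  intro code
  induction code using canonB.induct with
  | case1 => intro data; simp [encALoop, canonB]
  | case2 x t ih =>
      intro data
      simp only [encALoop]
      rw [encAChunk_eq, ih]
      simp [canonB]

def finB (s : List Int × Int × List Int) : List Int :=
  if s.2.2 ≠ [] then s.1 ++ s.2.1 :: s.2.2 else s.1

theorem encBStep_fold (c : List Int) : ∀ (batch : List Int) (msb : Int) (data : List Int),
    batch.length < 7 → batch.length + c.length ≤ 7 →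
    c.foldl encBStep (data, msb, batch)
      = if batch.length + c.length = 7
        then (data ++ (msb + hiB batch.length c) :: (batch ++ c.map loB), 0, ([] : List Int))
        else (data, msb + hiB batch.length c, batch ++ c.map loB) := by
  induction c with
  | nil =>
      intro batch msb data h7 hle
      simp [hiB]
      omega
  | cons b t ih =>
      intro batch msb data h7 hle
      rw [List.foldl_cons]
      by_cases hfl : batch.length + 1 = 7
      · have ht : t = [] := by
          have : t.length = 0 := by simp at hle; omega
          exact List.eq_nil_of_length_eq_zero this
        subst ht
        by_cases hb : PySem.Int.band b 0x80 ≠ 0 <;>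
          simp [encBStep, hb, hfl, hiB, loB]
      · have hstep : encBStep (data, msb, batch) b
            = (data, msb + (if PySem.Int.band b 0x80 ≠ 0 then (2:Int) ^ batch.length else 0),
               batch ++ [loB b]) := by
          by_cases hb : PySem.Int.band b 0x80 ≠ 0 <;> simp [encBStep, hb, hfl, loB]
        rw [hstep]
        have hlen : (batch ++ [loB b]).length < 7 := by simp; omega
        have hle' : (batch ++ [loB b]).length + t.length ≤ 7 := by simp at hle ⊢; omega
        rw [ih _ _ _ hlen hle']
        simp [hiB]
        by_cases hc : batch.length + (t.length + 1) = 7 <;>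
          simp [hc, show batch.length + 1 + t.length = batch.length + (t.length + 1) by omega] <;>
          ring_nf

theorem encB_fold_eq : ∀ (code : List Int), ∀ data,
    finB (code.foldl encBStep (data, 0, [])) = data ++ canonB code := by
  intro code
  induction code using canonB.induct with
  | case1 => intro data; simp [finB, canonB]
  | case2 x t ih =>
      intro data
      by_cases hlen : (x :: t).length ≤ 7
      · have hdrop : (x :: t).drop 7 = [] := List.drop_eq_nil_of_le hlen
        have htake : (x :: t).take 7 = x :: t := List.take_of_length_le hlen
        have hfold := encBStep_fold (x :: t) [] 0 data (by simp) (by simp only [List.length_nil, List.length_cons] at hlen ⊢; omega)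
        rw [hfold]
        by_cases h7 : t.length + 1 = 7
        · rw [if_pos (by simp; omega)]
          simp [finB, canonB, htake, hdrop]
        · rw [if_neg (by simp; omega)]
          simp [finB, canonB, htake, hdrop]
      · have ht6 : 6 ≤ t.length := by simp at hlen; omega
        have hsplit : (x :: t) = (x :: t).take 7 ++ (x :: t).drop 7 :=
          (List.take_append_drop 7 (x :: t)).symm
        conv_lhs => rw [hsplit]
        rw [List.foldl_append]
        rw [encBStep_fold _ [] 0 data (by simp) (by simp [List.length_take])]
        rw [if_pos (by simp [List.length_take]; omega)]
        rw [ih]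
        simp [canonB, List.append_assoc]

-- ===== VERDICT (by name: the statement is the Claim_ definition above) =====
theorem encode_code_py_spec : Claim_equal_encode_code_py := by
  intro code _
  unfold Spec_encode_code_py encode_code_py encode_code_py_alt
  rw [encALoop_eq code []]
  have := encB_fold_eq code []
  unfold finB at this
  rcases h : code.foldl encBStep ([], 0, []) with ⟨d, m, b⟩
  rw [h] at this
  simpa using this.symm
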